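-- pv_equiv track=rewrite | github.com/MrBrantCode/unitest_baseline | mut_generate/mist_train_taco/taco_14411/solution.py | count_and_sort_names
-- ===== SOURCE A (Python) =====
-- def count_and_sort_names(names):
--     # Step 1: Sort the names in dictionary order
--     sorted_names = sorted(names)
--
--     # Step 2: Initialize the result list
--     sorted_names_with_counts = []
--
--     # Step 3: Iterate through the sorted names and count frequencies
--     i = 0
--     while i < len(sorted_names):
--         name = sorted_names[i]
--         count = 1
--         while i + 1 < len(sorted_names) and sorted_names[i + 1] == name:
--             count += 1
--             i += 1
--         sorted_names_with_counts.append((name, count))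
--         i += 1
--
--     return sorted_names_with_counts
-- ===== SOURCE B (Python) =====
-- def count_and_sort_names(names):
--     counts = {}
--     for name in names:
--         counts[name] = counts.get(name, 0) + 1
--     return sorted(counts.items(), key=lambda item: item[0])
-- ===== Notes on version B (the rewrite author's own statement) =====
-- stated objective: idiomatic
-- what changed: B tallies counts in a single pass over the unsorted list with a dictionary and then sorts only the aggregated (name, count) pairs by name, instead of pre-sorting all names and merging consecutive duplicates with a nested index loop.
import Mathlib
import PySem

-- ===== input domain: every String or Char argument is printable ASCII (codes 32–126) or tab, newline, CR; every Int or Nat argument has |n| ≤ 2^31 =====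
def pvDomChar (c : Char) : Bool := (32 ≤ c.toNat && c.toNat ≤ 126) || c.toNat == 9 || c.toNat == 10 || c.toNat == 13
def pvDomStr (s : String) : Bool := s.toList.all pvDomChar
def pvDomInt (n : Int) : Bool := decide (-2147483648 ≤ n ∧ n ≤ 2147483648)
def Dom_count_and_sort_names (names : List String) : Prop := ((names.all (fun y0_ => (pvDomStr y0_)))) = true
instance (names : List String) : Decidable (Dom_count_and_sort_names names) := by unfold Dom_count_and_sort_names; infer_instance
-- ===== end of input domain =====

-- B replaces A's sort-then-merge-consecutive-runs with a one-pass dictionary tally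
-- followed by sorting the aggregated (name, count) pairs by name (idiomatic; same result).

-- ===== PORT A =====
-- inner 'while i + 1 < len(sorted_names) and sorted_names[i + 1] == name: count += 1; i += 1'
def pvAInner (s : List String) (name : String) (i : Nat) (count : Int) : Nat × Int :=
  if h : i + 1 < s.length then
    if s[i + 1] = name then pvAInner s name (i + 1) (count + 1)
    else (i, count)
  else (i, count)
termination_by s.length - i

theorem pvAInner_fst_ge (s : List String) (name : String) (i : Nat) (count : Int) :
    i ≤ (pvAInner s name i count).1 := by
  fun_induction pvAInner s name i count with
  | case1 i count h hx ih => omega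
  | case2 => simp
  | case3 => simp

-- outer 'while i < len(sorted_names): …'
def pvAOuter (s : List String) (i : Nat) (acc : List (String × Int)) : List (String × Int) :=
  if h : i < s.length then
    let name := s[i]
    let r := pvAInner s name i 1
    pvAOuter s (r.1 + 1) (acc ++ [(name, r.2)])
  else acc
termination_by s.length - i
decreasing_by have := pvAInner_fst_ge s s[i] i 1; omega

def count_and_sort_names (names : List String) : List (String × Int) :=
  pvAOuter (PySem.List.sorted names (fun x => x) false) 0 []

-- ===== PORT B =====
def count_and_sort_names_alt (names : List String) : List (String × Int) :=
  let counts : PySem.Dict String Int :=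
    names.foldl (fun d name => d.insert name (d.getD name 0 + 1)) PySem.Dict.empty
  PySem.List.sorted counts.items (fun item => item.1) false

-- ===== PRECONDITION & SPEC =====
def Spec_count_and_sort_names (names : List String) (out : List (String × Int)) : Prop := out = count_and_sort_names_alt names
instance (names : List String) (out : List (String × Int)) : Decidable (Spec_count_and_sort_names names out) := by unfold Spec_count_and_sort_names; infer_instance

-- ===== CLAIM (what is proved, stated in full; the proofs are below) =====
def Claim_equal_count_and_sort_names : Prop := ∀ (names : List String), Dom_count_and_sort_names names → Spec_count_and_sort_names names (count_and_sort_names names)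

-- ===== LEMMAS AND PROOFS =====

-- structural grouping of consecutive equal elements (proof-side mirror of A's index loops)
def pvGroups : List String → List (String × Int)
  | [] => []
  | x :: t =>
      (x, 1 + ((t.takeWhile (fun y => y == x)).length : Int)) ::
        pvGroups (t.dropWhile (fun y => y == x))
termination_by l => l.length
decreasing_by
  have := List.length_dropWhile_le (fun y => y == x) t
  simp; omega

theorem pvDropWhile_eq_drop (p : String → Bool) (l : List String) :
    l.dropWhile p = l.drop (l.takeWhile p).length := by
  induction l with
  | nil => rfl
  | cons x t ih => by_cases h : p x <;> simp [h, ih]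

theorem pvAInner_spec (s : List String) (name : String) (i : Nat) (count : Int) :
    pvAInner s name i count =
      (i + ((s.drop (i + 1)).takeWhile (fun y => y == name)).length,
       count + (((s.drop (i + 1)).takeWhile (fun y => y == name)).length : Int)) := by
  fun_induction pvAInner s name i count with
  | case1 i count h hx ih =>
      rw [ih]
      rw [List.drop_eq_getElem_cons h]
      simp [hx]
      constructor <;> omega
  | case2 i count h hx =>
      rw [List.drop_eq_getElem_cons h]
      simp [hx]
  | case3 i count h =>
      rw [List.drop_eq_nil_of_le (by omega)]
      simp

theorem pvAOuter_spec (s : List String) (i : Nat) (acc : List (String × Int)) :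
    pvAOuter s i acc = acc ++ pvGroups (s.drop i) := by
  fun_induction pvAOuter s i acc with
  | case1 i acc h name r ih =>
      have hL : r = (i + ((s.drop (i + 1)).takeWhile (fun y => y == s[i])).length,
                     1 + (((s.drop (i + 1)).takeWhile (fun y => y == s[i])).length : Int)) := by
        show pvAInner s s[i] i 1 = _
        rw [pvAInner_spec]
      have hdrop : s.drop i = s[i] :: s.drop (i + 1) := List.drop_eq_getElem_cons h
      have hdw : s.drop (i + ((s.drop (i + 1)).takeWhile (fun y => y == s[i])).length + 1) =
          (s.drop (i + 1)).dropWhile (fun y => y == s[i]) := by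
        rw [pvDropWhile_eq_drop, List.drop_drop]
        congr 1
        omega
      rw [ih, hL, hdrop]
      simp only [pvGroups]
      simp [hdw]
      rfl
  | case2 i acc h =>
      rw [List.drop_eq_nil_of_le (by omega)]
      simp only [pvGroups, List.append_nil]

-- setup facts about one sorted group: run and rest of x :: t
theorem pvRest_lt (x : String) (t : List String) (hs : (x :: t).Pairwise (· ≤ ·)) :
    ∀ y ∈ t.dropWhile (fun y => y == x), x < y := by
  rcases List.pairwise_cons.mp hs with ⟨hx_le, ht⟩
  have hsub : (t.dropWhile (fun y => y == x)).Sublist t := List.dropWhile_sublist _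
  have hrest_pw : (t.dropWhile (fun y => y == x)).Pairwise (· ≤ ·) := ht.sublist hsub
  cases hr : t.dropWhile (fun y => y == x) with
  | nil => intro y hy; simp at hy
  | cons hd r' =>
      have hne : t.dropWhile (fun y => y == x) ≠ [] := by rw [hr]; simp
      have hhd0 := List.head_dropWhile_not (fun y => y == x) hne
      have hhd : hd ≠ x := by
        simp only [hr, List.head_cons] at hhd0
        simpa using hhd0
      have hhd_mem : hd ∈ t := hsub.mem (by rw [hr]; simp)
      have hx_lt_hd : x < hd := lt_of_le_of_ne (hx_le hd hhd_mem) (Ne.symm hhd)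
      rw [hr] at hrest_pw
      rcases List.pairwise_cons.mp hrest_pw with ⟨hhd_le, _⟩
      intro y hy
      rcases List.mem_cons.mp hy with h1 | h1
      · exact h1 ▸ hx_lt_hd
      · exact lt_of_lt_of_le hx_lt_hd (hhd_le y h1)

theorem pvCount_head (x : String) (t : List String) (hs : (x :: t).Pairwise (· ≤ ·)) :
    (x :: t).count x = 1 + (t.takeWhile (fun y => y == x)).length := by
  have hrest := pvRest_lt x t hs
  have hx_notin : x ∉ t.dropWhile (fun y => y == x) := fun hm => lt_irrefl x (hrest x hm)
  have hsplit : t.takeWhile (fun y => y == x) ++ t.dropWhile (fun y => y == x) = t :=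
    List.takeWhile_append_dropWhile
  have hrun : ∀ b ∈ t.takeWhile (fun y => y == x), x = b := by
    intro b hb
    have := List.mem_takeWhile_imp hb
    simp at this
    exact this.symm
  have hct : t.count x = (t.takeWhile (fun y => y == x)).length := by
    conv_lhs => rw [← hsplit]
    rw [List.count_append, List.count_eq_length.mpr hrun, List.count_eq_zero.mpr hx_notin]
    omega
  rw [List.count_cons_self, hct]
  omega

theorem pvCount_rest (x : String) (t : List String) (hs : (x :: t).Pairwise (· ≤ ·))
    (k : String) (hk : k ∈ t.dropWhile (fun y => y == x)) :
    (x :: t).count k = (t.dropWhile (fun y => y == x)).count k := by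
  have hxk : x < k := pvRest_lt x t hs k hk
  have hsplit : t.takeWhile (fun y => y == x) ++ t.dropWhile (fun y => y == x) = t :=
    List.takeWhile_append_dropWhile
  have hkrun : k ∉ t.takeWhile (fun y => y == x) := by
    intro hm
    have := List.mem_takeWhile_imp hm
    simp at this
    exact absurd (this ▸ hxk) (lt_irrefl x)
  rw [List.count_cons_of_ne (ne_of_lt hxk)]
  conv_lhs => rw [← hsplit]
  rw [List.count_append, List.count_eq_zero.mpr hkrun]
  omega

theorem pvRest_pairwise (x : String) (t : List String) (hs : (x :: t).Pairwise (· ≤ ·)) :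
    (t.dropWhile (fun y => y == x)).Pairwise (· ≤ ·) :=
  (List.pairwise_cons.mp hs).2.sublist (List.dropWhile_sublist _)

theorem pvGroups_mem (s : List String) (hs : s.Pairwise (· ≤ ·)) :
    ∀ p ∈ pvGroups s, p.1 ∈ s ∧ p.2 = (s.count p.1 : Int) := by
  induction s using pvGroups.induct with
  | case1 => intro p hp; simp [pvGroups] at hp
  | case2 x t ih =>
      intro p hp
      simp only [pvGroups, List.mem_cons] at hp
      rcases hp with hp | hp
      · subst hp
        refine ⟨List.mem_cons_self, ?_⟩
        simp only [pvCount_head x t hs]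
        push_cast
        ring
      · have hrest_pw := pvRest_pairwise x t hs
        rcases ih hrest_pw p hp with ⟨hmem, hcnt⟩
        refine ⟨List.mem_cons_of_mem _ ((List.dropWhile_sublist _).mem hmem), ?_⟩
        rw [hcnt, pvCount_rest x t hs p.1 hmem]

theorem pvGroups_pairwise (s : List String) (hs : s.Pairwise (· ≤ ·)) :
    (pvGroups s).Pairwise (fun a b => a.1 < b.1) := by
  induction s using pvGroups.induct with
  | case1 => simp [pvGroups]
  | case2 x t ih =>
      have hrest_pw := pvRest_pairwise x t hs
      simp only [pvGroups]
      refine List.pairwise_cons.mpr ⟨?_, ih hrest_pw⟩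
      intro q hq
      exact pvRest_lt x t hs q.1 (pvGroups_mem _ hrest_pw q hq).1

theorem pvGroups_complete (s : List String) (hs : s.Pairwise (· ≤ ·)) :
    ∀ k ∈ s, (k, (s.count k : Int)) ∈ pvGroups s := by
  induction s using pvGroups.induct with
  | case1 => intro k hk; simp at hk
  | case2 x t ih =>
      intro k hk
      simp only [pvGroups, List.mem_cons]
      by_cases hkx : k = x
      · subst hkx
        left
        simp only [pvCount_head k t hs]
        push_cast
        ring_nf
      · right
        have hkt : k ∈ t := (List.mem_cons.mp hk).resolve_left hkx
        have hkrest : k ∈ t.dropWhile (fun y => y == x) := by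
          have hsplit : t.takeWhile (fun y => y == x) ++ t.dropWhile (fun y => y == x) = t :=
            List.takeWhile_append_dropWhile
          rcases List.mem_append.mp (hsplit ▸ hkt) with hm | hm
          · have := List.mem_takeWhile_imp hm
            simp at this
            exact absurd this hkx
          · exact hm
        have := ih (pvRest_pairwise x t hs) k hkrest
        rw [pvCount_rest x t hs k hkrest]
        exact this

-- ===== VERDICT (by name: the statement is the Claim_ definition above) =====
theorem count_and_sort_names_spec : Claim_equal_count_and_sort_names := by
  intro names _
  unfold Spec_count_and_sort_names
  unfold count_and_sort_names count_and_sort_names_alt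
  rw [pvAOuter_spec, List.drop_zero, List.nil_append]
  simp only [PySem.Dict.foldl_insert_getD_add_one_eq_counter, PySem.Dict.items_counter]
  have hsp : (PySem.List.sorted names (fun x => x) false).Pairwise (· ≤ ·) :=
    PySem.List.sorted_pairwise names (fun x => x)
  have hperm : (PySem.List.sorted names (fun x => x) false).Perm names :=
    PySem.List.sorted_perm names (fun x => x) false
  refine Eq.symm (PySem.List.sorted_eq_of_perm_of_pairwise_lt _ _
    (fun item : String × Int => item.1) ?_ (pvGroups_pairwise _ hsp))
  refine (List.perm_ext_iff_of_nodup ?_ ?_).mpr ?_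
  · exact (pvGroups_pairwise _ hsp).imp (fun {a b} hab heq => absurd (heq ▸ hab) (lt_irrefl _))
  · refine (PySem.Set.nodup_ofList (xs := names)).map ?_
    intro a b hab
    exact congrArg Prod.fst hab
  · intro p
    constructor
    · intro hp
      rcases pvGroups_mem _ hsp p hp with ⟨hmem, hcnt⟩
      refine List.mem_map.mpr ⟨p.1, (PySem.Set.mem_ofList names p.1).mpr (hperm.mem_iff.mp hmem), ?_⟩
      rw [hperm.count_eq] at hcnt
      exact Prod.ext rfl hcnt.symm
    · intro hp
      rcases List.mem_map.mp hp with ⟨k, hk, hpk⟩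
      have hk' : k ∈ names := (PySem.Set.mem_ofList names k).mp hk
      have := pvGroups_complete _ hsp k (hperm.mem_iff.mpr hk')
      rw [hperm.count_eq] at this
      exact hpk ▸ this
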